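-- pv_equiv track=rewrite | github.com/danhalligan/rosalind.info | rosalind/bioinformatics_stronghold/long.py | construct_assembly
-- ===== SOURCE A (Python) =====
-- from math import floor
--
-- def find_overlap(s1, s2, min_overlap=None):
--     ix = 1
--     if min_overlap is None:
--         min_overlap = floor(len(s2) / 2)
--     while ix < len(s1):
--         ix = s1.find(s2[:min_overlap], ix)
--         if ix == -1:
--             break
--         if s2.startswith(s1[ix:]):
--             return len(s1) - ix
--         ix += 1
--
-- def construct_assembly(seqs):
--     # Build a forward and reverse overlap graph of sequences
--     fmap, rmap, starts, ends = ({}, {}, {}, {})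
--     for p1 in seqs.keys():
--         for p2 in seqs.keys():
--             if p1 in starts or p2 in ends or p1 in p2:
--                 continue
--             n = find_overlap(seqs[p1], seqs[p2])
--             if n:
--                 fmap[p1] = {"overlap": n, "next": p2}
--                 rmap[p2] = p1
--                 starts[p1] = True
--                 ends[p2] = True
--                 break
--
--     # Find starting key using rmap
--     k = list(seqs.keys())[0]
--     while k in rmap:
--         k = rmap[k]
--
--     # Initialise list with sequence 1, then add suffixes of matching sequences
--     seq = [seqs[k]]
--     while k in fmap:
--         seq.append(seqs[fmap[k]["next"]][fmap[k]["overlap"] :])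
--         k = fmap[k]["next"]
--
--     # Join all sequences
--     return "".join(seq)
-- ===== SOURCE B (Python) =====
-- def _overlap(s1, s2):
--     # longest proper overlap: largest n with len(s2)//2 <= n <= len(s1)-1
--     # such that the length-n suffix of s1 is a prefix of s2; 0 if none
--     for n in range(len(s1) - 1, len(s2) // 2 - 1, -1):
--         if s2.startswith(s1[len(s1) - n:]):
--             return n
--     return 0
--
--
-- def construct_assembly(seqs):
--     keys = list(seqs)
--     succ, used = {}, set()
--     for p1 in keys:
--         cand = next(((n, p2) for p2 in keys
--                      if p2 not in used and p1 not in p2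
--                      for n in [_overlap(seqs[p1], seqs[p2])] if n), None)
--         if cand:
--             succ[p1] = cand
--             used.add(cand[1])
--     pred = {p2: p1 for p1, (_, p2) in succ.items()}
--     k = keys[0]
--     while k in pred:
--         k = pred[k]
--     parts = [seqs[k]]
--     while k in succ:
--         n, k = succ[k]
--         parts.append(seqs[k][n:])
--     return "".join(parts)
-- ===== Notes on version B (the rewrite author's own statement) =====
-- stated objective: simpler
-- what changed: B computes each overlap directly as the longest suffix/prefix match by scanning candidate lengths downward (no str.find jumping), and replaces A's four bookkeeping dicts (fmap/rmap/starts/ends) with a single successor map plus a set of used targets, deriving the predecessor map by one inversion at the end.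
import Mathlib
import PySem

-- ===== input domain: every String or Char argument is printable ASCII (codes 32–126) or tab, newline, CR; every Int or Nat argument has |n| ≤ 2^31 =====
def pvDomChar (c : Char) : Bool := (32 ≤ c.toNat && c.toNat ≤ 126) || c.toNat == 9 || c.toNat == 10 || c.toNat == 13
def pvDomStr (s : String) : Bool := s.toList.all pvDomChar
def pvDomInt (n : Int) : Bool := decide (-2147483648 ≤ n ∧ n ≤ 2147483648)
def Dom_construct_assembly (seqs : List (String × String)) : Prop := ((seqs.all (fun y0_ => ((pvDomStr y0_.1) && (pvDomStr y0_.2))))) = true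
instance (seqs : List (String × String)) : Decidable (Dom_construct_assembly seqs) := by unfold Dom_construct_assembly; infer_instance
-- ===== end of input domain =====

-- B replaces A's find()-driven overlap scan by a direct longest-suffix/prefix downward scan and A's
-- four bookkeeping dicts by one successor map plus a set of used targets (objective: simpler).
-- Neither Python mutates its argument; the equivalence is about the return value.

-- ===== PORT A =====
-- bound needed by pvFindLoopA's termination proof (cited in its decreasing_by)
theorem pvFindFrom_lt (s pat : List Char) (ix : Nat) (hix : ix < s.length)
    (h : PySem.Chars.findFrom s pat (ix : Int) none ≠ -1) :
    (ix : Int) ≤ PySem.Chars.findFrom s pat (ix : Int) none ∧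
      PySem.Chars.findFrom s pat (ix : Int) none < (s.length : Int) := by
  have hle : ix ≤ s.length := Nat.le_of_lt hix
  have hspec := PySem.Chars.findFrom_natCast_spec s pat ix hle h
  refine ⟨hspec.1, ?_⟩
  rcases hspec with ⟨h1, h2, -⟩
  rcases pat with _ | ⟨c, pat'⟩
  · rw [PySem.Chars.findFrom_natCast s _ ix hle] at h ⊢
    simp [PySem.Chars.find_nil] at h ⊢
    omega
  · have hlen := h2.length_le
    have hj : 0 ≤ PySem.Chars.findFrom s (c :: pat') (ix : Int) none := le_trans (by positivity) h1
    simp [List.length_drop] at hlen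
    omega

-- the 'while ix < len(s1)' loop of find_overlap (pat = s2[:min_overlap])
def pvFindLoopA (s1 s2 pat : List Char) (ix : Nat) : Option Int :=
  if h : ix < s1.length then
    let j := PySem.Chars.findFrom s1 pat (ix : Int) none
    if hj : j = -1 then none
    else if PySem.Chars.startswith s2 (PySem.List.slice s1 (some j) none) then
      some ((s1.length : Int) - j)
    else pvFindLoopA s1 s2 pat j.toNat.succ
  else none
termination_by s1.length - ix
decreasing_by
  have := pvFindFrom_lt s1 pat ix h hj
  omega

-- find_overlap(s1, s2) with the default min_overlap = floor(len(s2) / 2)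
def pvFindOverlapA (s1 s2 : List Char) : Option Int :=
  let m := PySem.Int.floordiv (s2.length : Int) 2
  pvFindLoopA s1 s2 (PySem.List.slice s2 none (some m)) 1

-- state: (fmap, rmap, starts, ends)
def pvStA : Type := PySem.Dict String (Int × String) × PySem.Dict String String ×
  PySem.Dict String Bool × PySem.Dict String Bool

-- the inner 'for p2 in seqs.keys()' loop (stops at the break)
def pvInnerA (d : PySem.Dict String String) (p1 : String) (st : pvStA) :
    List String → pvStA
  | [] => st
  | p2 :: rest =>
    if st.2.2.1.contains p1 || st.2.2.2.contains p2 || PySem.Str.isIn p1 p2 then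
      pvInnerA d p1 st rest
    else
      match pvFindOverlapA (d.getD p1 "").toList (d.getD p2 "").toList with
      | some n =>
        if n ≠ 0 then
          (st.1.insert p1 (n, p2), st.2.1.insert p2 p1,
           st.2.2.1.insert p1 true, st.2.2.2.insert p2 true)
        else pvInnerA d p1 st rest
      | none => pvInnerA d p1 st rest

-- 'while k in rmap: k = rmap[k]' — fuel keys.length + 1 never runs out on Pre_ inputs
-- (on a cyclic overlap graph the Python loops forever; Pre_ excludes those inputs)
def pvChaseA (rmap : PySem.Dict String String) : Nat → String → String
  | 0, k => k
  | fuel + 1, k => if rmap.contains k then pvChaseA rmap fuel (rmap.getD k "") else k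

-- 'while k in fmap: seq.append(seqs[fmap[k]["next"]][fmap[k]["overlap"]:]); k = ...' — same fuel remark
def pvForwardA (d : PySem.Dict String String) (fmap : PySem.Dict String (Int × String)) :
    Nat → String → List String → List String
  | 0, _, seq => seq
  | fuel + 1, k, seq =>
    if fmap.contains k then
      let e := fmap.getD k (0, "")
      pvForwardA d fmap fuel e.2 (seq ++ [PySem.Str.slice (d.getD e.2 "") (some e.1) none])
    else seq

def construct_assembly (seqs : List (String × String)) : String :=
  let d : PySem.Dict String String := PySem.Dict.mk seqs
  let keys := d.keys
  let st := keys.foldl (fun st p1 => pvInnerA d p1 st keys)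
    ((PySem.Dict.empty, PySem.Dict.empty, PySem.Dict.empty, PySem.Dict.empty) : pvStA)
  let k0 := PySem.List.pyGetD keys 0 ""   -- list(seqs.keys())[0]; IndexError on {} is excluded by Pre_
  let k1 := pvChaseA st.2.1 (keys.length + 1) k0
  PySem.Str.join "" (pvForwardA d st.1 (keys.length + 1) k1 [d.getD k1 ""])

-- ===== PORT B =====
-- _overlap: scan n downward from len(s1)-1 to len(s2)//2, first (= longest) suffix/prefix match, else 0
def pvOverlapB (s1 s2 : List Char) : Int :=
  match (PySem.List.pyRange ((s1.length : Int) - 1)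
      (PySem.Int.floordiv (s2.length : Int) 2 - 1) (-1)).findSome?
      (fun n => if PySem.Chars.startswith s2 (PySem.List.slice s1 (some ((s1.length : Int) - n)) none)
                then some n else none) with
  | some n => n
  | none => 0

-- the generator: first (n, p2) over keys with p2 unused, p1 not a substring of p2, truthy overlap
def pvFirstB (d : PySem.Dict String String) (p1 : String) (used : PySem.Set String)
    (keys : List String) : Option (Int × String) :=
  keys.findSome? (fun p2 =>
    if !(PySem.Set.contains used p2) && !(PySem.Str.isIn p1 p2) then
      let n := pvOverlapB (d.getD p1 "").toList (d.getD p2 "").toList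
      if n ≠ 0 then some (n, p2) else none
    else none)

-- 'while k in pred: k = pred[k]' (same fuel remark as port A)
def pvChaseB (pred : PySem.Dict String String) : Nat → String → String
  | 0, k => k
  | fuel + 1, k => if pred.contains k then pvChaseB pred fuel (pred.getD k "") else k

-- 'while k in succ: n, k = succ[k]; parts.append(seqs[k][n:])'
def pvForwardB (d : PySem.Dict String String) (succ : PySem.Dict String (Int × String)) :
    Nat → String → List String → List String
  | 0, _, parts => parts
  | fuel + 1, k, parts =>
    if succ.contains k then
      let e := succ.getD k (0, "")
      pvForwardB d succ fuel e.2 (parts ++ [PySem.Str.slice (d.getD e.2 "") (some e.1) none])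
    else parts

def construct_assembly_alt (seqs : List (String × String)) : String :=
  let d : PySem.Dict String String := PySem.Dict.mk seqs
  let keys := d.keys
  let st := keys.foldl (fun st p1 =>
      match pvFirstB d p1 st.2 keys with
      | some c => (st.1.insert p1 c, PySem.Set.add st.2 c.2)
      | none => st)
    ((PySem.Dict.empty, PySem.Set.empty) : PySem.Dict String (Int × String) × PySem.Set String)
  let pred := st.1.items.foldl (fun pr p => pr.insert p.2.2 p.1)
    (PySem.Dict.empty : PySem.Dict String String)
  let k0 := PySem.List.pyGetD keys 0 ""
  let k1 := pvChaseB pred (keys.length + 1) k0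
  PySem.Str.join "" (pvForwardB d st.1 (keys.length + 1) k1 [d.getD k1 ""])

-- ===== PRECONDITION & SPEC =====
-- Pre_ helpers: an independent description of the greedy overlap graph, used only to state where
-- A's backward 'while k in rmap' walk exits (on a cyclic graph the Python loops forever).
def pvOvN (s1 s2 : List Char) : Nat :=
  ((List.range s1.length).filter
    (fun n => decide (s2.length / 2 ≤ n ∧ s1.drop (s1.length - n) <+: s2))).foldr max 0

def pvGraph (seqs : List (String × String)) : List (String × String) :=
  let ks := seqs.map Prod.fst
  ks.foldl (fun edges p1 =>
    match ks.find? (fun p2 => decide ((∀ e ∈ edges, e.2 ≠ p2) ∧ ¬ p1.toList <:+: p2.toList ∧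
        pvOvN ((seqs.lookup p1).getD "").toList ((seqs.lookup p2).getD "").toList ≠ 0)) with
    | some p2 => edges ++ [(p1, p2)]
    | none => edges) []

def pvBack (edges : List (String × String)) : Nat → String → Option String
  | 0, k => if (edges.find? (fun e => e.2 == k)).isSome then none else some k
  | i + 1, k =>
    match edges.find? (fun e => e.2 == k) with
    | some e => pvBack edges i e.1
    | none => some k

-- Pre_ excludes: the empty dict (A raises IndexError); duplicate keys (impossible for a Python dict —
-- the association-list encoding would be ambiguous); and inputs on which A's backward 'while k in rmap'
-- walk from the first key never exits, i.e. runs into a cycle of the overlap graph (the Python then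
-- loops forever, so A returns no value there).
def Pre_construct_assembly (seqs : List (String × String)) : Prop :=
  seqs ≠ [] ∧ (seqs.map Prod.fst).Nodup ∧
    (pvBack (pvGraph seqs) seqs.length ((seqs.map Prod.fst).headD "")).isSome = true

instance (seqs : List (String × String)) : Decidable (Pre_construct_assembly seqs) := by
  unfold Pre_construct_assembly; infer_instance

def pvWitness_construct_assembly : (List (String × String)) :=
  [("a", "GATTACA"), ("b", "ACAGGT")]

def Spec_construct_assembly (seqs : List (String × String)) (out : String) : Prop := out = construct_assembly_alt seqs
instance (seqs : List (String × String)) (out : String) : Decidable (Spec_construct_assembly seqs out) := by unfold Spec_construct_assembly; infer_instance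

-- ===== CLAIM (what is proved, stated in full; the proofs are below) =====
def Claim_equal_construct_assembly : Prop := ∀ (seqs : List (String × String)), Dom_construct_assembly seqs → Pre_construct_assembly seqs → Spec_construct_assembly seqs (construct_assembly seqs)

-- ===== LEMMAS AND PROOFS =====

-- F1
theorem pv_take_prefix_of_drop_prefix (s1 s2 : List Char) (m' j : Nat) (hm : m' ≤ s2.length)
    (hjL : j + m' ≤ s1.length) (hsw : s1.drop j <+: s2) : s2.take m' <+: s1.drop j := by
  obtain ⟨t, ht⟩ := hsw
  have hlen : m' ≤ (s1.drop j).length := by simp [List.length_drop]; omega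
  have : s2.take m' = (s1.drop j).take m' := by
    rw [← ht, List.take_append_of_le_length hlen]
  rw [this]
  exact List.take_prefix _ _

theorem pv_findSome?_congr {α β : Type} (l : List α) (f g : α → Option β)
    (h : ∀ x ∈ l, f x = g x) : l.findSome? f = l.findSome? g := by
  induction l with
  | nil => rfl
  | cons a l ih =>
    simp only [List.findSome?_cons, h a (by simp)]
    cases g a with
    | none => exact ih (fun x hx => h x (by simp [hx]))
    | some b => rfl

theorem pv_loopA_eq (s1 s2 : List Char) (m' : Nat) (hm : m' ≤ s2.length) :
    ∀ fuel ix, 1 ≤ ix → s1.length - ix ≤ fuel →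
    pvFindLoopA s1 s2 (s2.take m') ix =
      (List.range' ix (s1.length - ix)).findSome? (fun j =>
        if j + m' ≤ s1.length ∧ PySem.Chars.startswith s2 (s1.drop j) = true
        then some ((s1.length : Int) - (j : Int)) else none) := by
  intro fuel
  induction fuel with
  | zero =>
    intro ix _ hf
    rw [pvFindLoopA]
    have : ¬ ix < s1.length := by omega
    simp [this, show s1.length - ix = 0 by omega]
  | succ fuel ih =>
    intro ix hix1 hf
    rw [pvFindLoopA]
    by_cases hlt : ix < s1.length
    · simp only [hlt, dif_pos]
      have hle : ix ≤ s1.length := Nat.le_of_lt hlt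
      by_cases hneg : PySem.Chars.findFrom s1 (s2.take m') (ix : Int) none = -1
      · simp [hneg]
        -- no occurrence of the pattern at or after ix: every candidate fails
        have hnotin : ¬ (s2.take m') <:+: s1.drop ix :=
          (PySem.Chars.findFrom_natCast_eq_neg_one_iff s1 (s2.take m') ix hle).mp hneg
        symm
        rw [List.findSome?_eq_none_iff]
        intro j hj
        rw [List.mem_range'_1] at hj
        split_ifs with hc
        · exfalso
          apply hnotin
          have hpre : s2.take m' <+: s1.drop j :=
            pv_take_prefix_of_drop_prefix s1 s2 m' j hm hc.1
              ((PySem.Chars.startswith_iff _ _).mp hc.2)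
          have hdrop : s1.drop j = (s1.drop ix).drop (j - ix) := by
            rw [List.drop_drop]; congr 1; omega
          exact hpre.isInfix.trans (hdrop ▸ (List.drop_suffix _ _).isInfix)
        · rfl
      · have hspec := PySem.Chars.findFrom_natCast_spec s1 (s2.take m') ix hle hneg
        have hbnd := pvFindFrom_lt s1 (s2.take m') ix hlt hneg
        set j : Int := PySem.Chars.findFrom s1 (s2.take m') (ix : Int) none with hjdef
        set J := j.toNat with hJdef
        have hjJ : j = (J : Int) := by omega
        have hixJ : ix ≤ J := by omega
        have hJL : J < s1.length := by omega
        have hpatJ : s2.take m' <+: s1.drop J := hspec.2.1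
        have hmJ : J + m' ≤ s1.length := by
          have hl := hpatJ.length_le
          simp [List.length_take, List.length_drop, Nat.min_eq_left hm] at hl
          omega
        have hmin : ∀ i, ix ≤ i → i < J → ¬ s2.take m' <+: s1.drop i := hspec.2.2
        have hsplit : List.range' ix (s1.length - ix) =
            List.range' ix (J - ix) ++ List.range' J (s1.length - J) := by
          have h1 : List.range' ix (J - ix) ++ List.range' (ix + (J - ix)) (s1.length - J) =
              List.range' ix ((J - ix) + (s1.length - J)) := List.range'_append_1 ..
          rw [show ix + (J - ix) = J by omega] at h1
          rw [h1]
          congr 1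
          omega
        rw [hsplit, List.findSome?_append]
        have hfirst : (List.range' ix (J - ix)).findSome? (fun j =>
            if j + m' ≤ s1.length ∧ PySem.Chars.startswith s2 (s1.drop j) = true
            then some ((s1.length : Int) - (j : Int)) else none) = none := by
          rw [List.findSome?_eq_none_iff]
          intro i hi
          rw [List.mem_range'_1] at hi
          split_ifs with hc
          · exact absurd (pv_take_prefix_of_drop_prefix s1 s2 m' i hm hc.1
              ((PySem.Chars.startswith_iff _ _).mp hc.2)) (hmin i (by omega) (by omega))
          · rfl
        rw [hfirst, Option.none_or]
        have hrange2 : List.range' J (s1.length - J) = J :: List.range' (J + 1) (s1.length - (J + 1)) := by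
          rw [show s1.length - J = (s1.length - (J + 1)) + 1 by omega, List.range'_succ]
        rw [hrange2, List.findSome?_cons]
        rw [hjJ]
        rw [dif_neg (show ¬ (J : Int) = -1 by omega)]
        rw [PySem.List.slice_from s1 (Int.natCast_nonneg J)]
        rw [Int.toNat_natCast]
        by_cases hsw : PySem.Chars.startswith s2 (s1.drop J) = true
        · rw [if_pos hsw, if_pos ⟨hmJ, hsw⟩]
        · rw [if_neg hsw, if_neg (fun hc => hsw hc.2)]
          exact ih (J + 1) (by omega) (by omega)
    · have : s1.length - ix = 0 := by omega
      simp [hlt, this]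

theorem pv_ov_eq (s1 s2 : List Char) :
    pvFindOverlapA s1 s2 = if pvOverlapB s1 s2 = 0 then none else some (pvOverlapB s1 s2) := by
  set L := s1.length with hL
  set m' := s2.length / 2 with hm'
  have hm'le : m' ≤ s2.length := Nat.div_le_self _ _
  have hfd : PySem.Int.floordiv (s2.length : Int) 2 = (m' : Int) := by
    exact_mod_cast PySem.Int.floordiv_natCast s2.length 2
  have hloop := pv_loopA_eq s1 s2 m' hm'le L 1 (le_refl 1) (by omega)
  clear_value L m'
  set f : Nat → Option Int := fun j =>
    if j + m' ≤ L ∧ PySem.Chars.startswith s2 (s1.drop j) = true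
    then some ((L : Int) - (j : Int)) else none with hf
  set g : Nat → Option Int := fun j =>
    if PySem.Chars.startswith s2 (s1.drop j) = true
    then some ((L : Int) - (j : Int)) else none with hg
  have hA : pvFindOverlapA s1 s2 = (List.range' 1 (L - 1)).findSome? f := by
    show pvFindLoopA s1 s2
      (PySem.List.slice s2 none (some (PySem.Int.floordiv (s2.length : Int) 2))) 1 = _
    rw [hfd, PySem.List.slice_to_natCast, hloop, hf, ← hL]
  have hB : pvOverlapB s1 s2 = (match (List.range' 1 (L - m')).findSome? g with
      | some v => v | none => 0) := by
    unfold pvOverlapB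
    rw [hfd, PySem.List.pyRange_neg_one]
    rw [show (((s1.length : Int) - 1) - ((m' : Int) - 1)).toNat = L - m' by omega]
    have hmap : ((List.range (L - m')).map (fun k : Nat => ((s1.length : Int) - 1) - (k : Int))).findSome?
        (fun n => if PySem.Chars.startswith s2
            (PySem.List.slice s1 (some ((s1.length : Int) - n)) none) = true
          then some n else none)
        = (List.range' 1 (L - m')).findSome? g := by
      rw [List.findSome?_map, List.range'_eq_map_range, List.findSome?_map]
      apply pv_findSome?_congr
      intro k hk
      simp only [Function.comp]
      rw [show (s1.length : Int) - ((s1.length : Int) - 1 - (k : Int)) = ((k + 1 : Nat) : Int)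
        by push_cast; ring]
      rw [PySem.List.slice_from s1 (by positivity), Int.toNat_natCast]
      rw [hg]
      simp only []
      rw [show 1 + k = k + 1 by omega]
      split_ifs with h1
      · congr 1
        rw [← hL]
        push_cast
        ring
      · rfl
    rw [hmap]
  rw [hA, hB]
  by_cases hm0 : m' = 0
  · rcases Nat.eq_zero_or_pos L with hL0 | hLpos
    · simp [hL0, hm0]
    · have hcat : List.range' 1 (L - m') = List.range' 1 (L - 1) ++ [L] := by
        rw [hm0, Nat.sub_zero, show L = (L - 1) + 1 by omega, List.range'_concat]
        congr 2
        omega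
      have hfg : ∀ j ∈ List.range' 1 (L - 1), f j = g j := by
        intro j hj
        rw [List.mem_range'_1] at hj
        rw [hf, hg]
        simp only []
        by_cases hsw : PySem.Chars.startswith s2 (s1.drop j) = true
        · rw [if_pos ⟨by omega, hsw⟩, if_pos hsw]
        · rw [if_neg (fun hc => hsw hc.2), if_neg hsw]
      have hgL : g L = some 0 := by
        rw [hg]
        simp only []
        rw [hL, List.drop_length]
        rw [if_pos ((PySem.Chars.startswith_iff _ _).mpr (List.nil_prefix))]
        simp
      rw [pv_findSome?_congr _ f g hfg, hcat, List.findSome?_append]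
      cases hF : (List.range' 1 (L - 1)).findSome? g with
      | none => simp [hgL]
      | some v =>
        obtain ⟨j, hjmem, hgj⟩ := List.exists_of_findSome?_eq_some hF
        rw [List.mem_range'_1] at hjmem
        rw [hg] at hgj
        simp only [] at hgj
        split_ifs at hgj with hsw
        injection hgj with hv
        have hvne : ¬ v = 0 := by omega
        simp [hvne]
  · have hcat : List.range' 1 (L - 1) =
        List.range' 1 (L - m') ++ List.range' (1 + (L - m')) ((L - 1) - (L - m')) := by
      have h1 : List.range' 1 (L - m') ++ List.range' (1 + (L - m')) ((L - 1) - (L - m')) =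
          List.range' 1 ((L - m') + ((L - 1) - (L - m'))) := List.range'_append_1 ..
      rw [h1]
      congr 1
      omega
    have hsecond : (List.range' (1 + (L - m')) ((L - 1) - (L - m'))).findSome? f = none := by
      rw [List.findSome?_eq_none_iff]
      intro j hj
      rw [List.mem_range'_1] at hj
      rw [hf]
      simp only []
      rw [if_neg (fun hc => by omega)]
    have hfg : ∀ j ∈ List.range' 1 (L - m'), f j = g j := by
      intro j hj
      rw [List.mem_range'_1] at hj
      rw [hf, hg]
      simp only []
      by_cases hsw : PySem.Chars.startswith s2 (s1.drop j) = true
      · rw [if_pos ⟨by omega, hsw⟩, if_pos hsw]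
      · rw [if_neg (fun hc => hsw hc.2), if_neg hsw]
    rw [hcat, List.findSome?_append, hsecond, pv_findSome?_congr _ f g hfg]
    cases hF : (List.range' 1 (L - m')).findSome? g with
    | none => simp
    | some v =>
      obtain ⟨j, hjmem, hgj⟩ := List.exists_of_findSome?_eq_some hF
      rw [List.mem_range'_1] at hjmem
      rw [hg] at hgj
      simp only [] at hgj
      split_ifs at hgj with hsw
      injection hgj with hv
      have hvne : ¬ v = 0 := by omega
      simp [hvne]
-- ---- fold/state equivalence ----

-- d.contains as contains of the key list
theorem pv_dict_contains_eq {ν : Type} (d : PySem.Dict String ν) (x : String) :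
    d.contains x = (d.items.map (fun p => p.1)).contains x := by
  rw [Bool.eq_iff_iff]
  simp [PySem.Dict.contains, List.any_eq_true, List.contains_iff_mem]

theorem pv_contains_mk_map {α ν : Type} (l : List α) (f : α → String) (g : α → ν) (x : String) :
    (PySem.Dict.mk (l.map (fun p => (f p, g p)))).contains x = (l.map f).contains x := by
  rw [PySem.Dict.contains_mk, Bool.eq_iff_iff]
  simp [List.any_eq_true, List.contains_iff_mem]

-- the relation maintained between A's four dicts and B's successor map + used set
def pvInv (stA : pvStA) (stB : PySem.Dict String (Int × String) × PySem.Set String) : Prop :=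
  stA.1 = stB.1 ∧
  stA.2.1 = PySem.Dict.mk (stB.1.items.map (fun p => (p.2.2, p.1))) ∧
  stA.2.2.1 = PySem.Dict.mk (stB.1.items.map (fun p => (p.1, true))) ∧
  stA.2.2.2 = PySem.Dict.mk (stB.2.map (fun k => (k, true))) ∧
  stB.2 = stB.1.items.map (fun p => p.2.2) ∧
  stB.2.Nodup

theorem pv_inner_eq (d : PySem.Dict String String) (p1 : String) (ks : List String)
    (stA : pvStA) (stB : PySem.Dict String (Int × String) × PySem.Set String)
    (hinv : pvInv stA stB) (hp1 : stB.1.contains p1 = false) :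
    pvInv (pvInnerA d p1 stA ks)
      (match pvFirstB d p1 stB.2 ks with
        | some c => (stB.1.insert p1 c, PySem.Set.add stB.2 c.2)
        | none => stB) := by
  induction ks with
  | nil => exact hinv
  | cons p2 rest ih =>
    obtain ⟨h1, h2, h3, h4, h5, h6⟩ := hinv
    have hstarts : stA.2.2.1.contains p1 = false := by
      rw [h3, pv_contains_mk_map stB.1.items (fun p => p.1) (fun _ => true) p1]
      rw [pv_dict_contains_eq] at hp1
      exact hp1
    have hends : stA.2.2.2.contains p2 = PySem.Set.contains stB.2 p2 := by
      rw [h4, pv_contains_mk_map stB.2 (fun k => k) (fun _ => true) p2,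
        PySem.Set.contains_eq_listContains, List.map_id']
    simp only [pvInnerA, pvFirstB, List.findSome?_cons]
    by_cases hb1 : PySem.Set.contains stB.2 p2 = true
    · -- p2 already used: both sides skip
      rw [hstarts, hends, hb1]
      simp only [Bool.false_or, Bool.true_or, if_true, Bool.not_true, Bool.false_and]
      exact ih
    · rw [Bool.not_eq_true] at hb1
      by_cases hb2 : PySem.Str.isIn p1 p2 = true
      · rw [hstarts, hends, hb1, hb2]
        simp only [Bool.false_or, Bool.or_true, if_true, Bool.not_true, Bool.and_false]
        exact ih
      · rw [Bool.not_eq_true] at hb2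
        rw [hstarts, hends, hb1, hb2]
        simp only [Bool.false_or, Bool.or_false, if_false, Bool.not_false, Bool.and_true,
          Bool.true_and, if_true]
        rw [pv_ov_eq]
        by_cases hn : pvOverlapB (d.getD p1 "").toList (d.getD p2 "").toList = 0
        · rw [if_pos hn]
          simp only [hn, ne_eq, not_true_eq_false, if_false]
          exact ih
        · rw [if_neg hn]
          simp only [ne_eq, hn, not_false_eq_true, if_true]
          -- both record the edge p1 → p2
          have hp2mem : p2 ∉ stB.2 := fun hmem => by
            rw [(PySem.Set.contains_iff _ _).mpr hmem] at hb1
            cases hb1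
          have hp1keys : (stB.1.items.map (fun p => p.1)).contains p1 = false := by
            rw [← pv_dict_contains_eq]
            exact hp1
          have hrmapc : (PySem.Dict.mk (stB.1.items.map (fun p =>
              (p.2.2, p.1)))).contains p2 = false := by
            rw [pv_contains_mk_map stB.1.items (fun p => p.2.2) (fun p => p.1) p2, ← h5]
            rw [PySem.Set.contains_eq_listContains] at hb1
            exact hb1
          have hitems : (stB.1.insert p1
              (pvOverlapB (d.getD p1 "").toList (d.getD p2 "").toList, p2)).items =
              stB.1.items ++ [(p1, (pvOverlapB (d.getD p1 "").toList (d.getD p2 "").toList, p2))] :=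
            PySem.Dict.items_insert_of_not_contains _ _ hp1
          simp only [Bool.false_eq_true, if_false]
          refine ⟨?_, ?_, ?_, ?_, ?_, ?_⟩
          · dsimp only
            rw [h1]
          · dsimp only
            apply PySem.Dict.ext
            rw [h2, PySem.Dict.items_insert_of_not_contains _ _ hrmapc]
            dsimp only
            rw [hitems]
            simp
          · dsimp only
            apply PySem.Dict.ext
            have hsc : (PySem.Dict.mk (stB.1.items.map (fun p =>
                (p.1, true)))).contains p1 = false := by
              rw [pv_contains_mk_map stB.1.items (fun p => p.1) (fun _ => true) p1]
              exact hp1keys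
            rw [h3, PySem.Dict.items_insert_of_not_contains _ _ hsc]
            dsimp only
            rw [hitems]
            simp
          · dsimp only
            apply PySem.Dict.ext
            have hec : (PySem.Dict.mk (stB.2.map (fun k => (k, true)))).contains p2 = false := by
              rw [pv_contains_mk_map stB.2 (fun k => k) (fun _ => true) p2, List.map_id']
              rw [PySem.Set.contains_eq_listContains] at hb1
              exact hb1
            rw [h4, PySem.Dict.items_insert_of_not_contains _ _ hec]
            dsimp only
            rw [PySem.Set.add_of_not_mem hp2mem]
            simp
          · dsimp only
            rw [PySem.Set.add_of_not_mem hp2mem, hitems]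
            simp only [List.map_append, List.map_cons, List.map_nil]
            rw [← h5]
          · dsimp only
            rw [PySem.Set.add_of_not_mem hp2mem]
            simp [List.nodup_append, h6]
            exact fun a ha he => hp2mem (he ▸ ha)

theorem pv_outer (d : PySem.Dict String String) (keys : List String) :
    ∀ (ks : List String) (stA : pvStA)
      (stB : PySem.Dict String (Int × String) × PySem.Set String),
      pvInv stA stB → ks.Nodup → (∀ k ∈ ks, stB.1.contains k = false) →
      pvInv (ks.foldl (fun st p1 => pvInnerA d p1 st keys) stA)
        (ks.foldl (fun st p1 => match pvFirstB d p1 st.2 keys with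
          | some c => (st.1.insert p1 c, PySem.Set.add st.2 c.2)
          | none => st) stB)
  | [], stA, stB, hinv, _, _ => hinv
  | p1 :: rest, stA, stB, hinv, hnd, hfresh => by
    simp only [List.foldl_cons]
    have hstep := pv_inner_eq d p1 keys stA stB hinv (hfresh p1 (by simp))
    apply pv_outer d keys rest _ _ hstep (List.Nodup.of_cons hnd)
    intro k hk
    cases hF : pvFirstB d p1 stB.2 keys with
    | none => simpa [hF] using hfresh k (by simp [hk])
    | some c =>
      simp only [hF]
      rw [PySem.Dict.contains_insert]
      have hne : k ≠ p1 := by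
        intro he
        subst he
        exact (List.nodup_cons.mp hnd).1 hk
      simp [hne, hfresh k (by simp [hk])]

theorem pv_chase_eq (r : PySem.Dict String String) :
    ∀ (fuel : Nat) (k : String), pvChaseA r fuel k = pvChaseB r fuel k
  | 0, _ => rfl
  | fuel + 1, k => by
    simp only [pvChaseA, pvChaseB]
    split_ifs <;> first | exact pv_chase_eq r fuel _ | rfl

theorem pv_forward_eq (d : PySem.Dict String String) (m : PySem.Dict String (Int × String)) :
    ∀ (fuel : Nat) (k : String) (acc : List String),
      pvForwardA d m fuel k acc = pvForwardB d m fuel k acc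
  | 0, _, _ => rfl
  | fuel + 1, k, acc => by
    simp only [pvForwardA, pvForwardB]
    split_ifs <;> first | exact pv_forward_eq d m fuel _ _ | rfl

theorem pv_main (seqs : List (String × String)) (hnd : (seqs.map Prod.fst).Nodup) :
    construct_assembly seqs = construct_assembly_alt seqs := by
  simp only [construct_assembly, construct_assembly_alt]
  have hknd : ((PySem.Dict.mk seqs : PySem.Dict String String).keys).Nodup := by
    rw [PySem.Dict.keys_mk]
    exact hnd
  have houter := pv_outer (PySem.Dict.mk seqs) (PySem.Dict.mk seqs).keys
    (PySem.Dict.mk seqs).keys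
    ((PySem.Dict.empty, PySem.Dict.empty, PySem.Dict.empty, PySem.Dict.empty) : pvStA)
    ((PySem.Dict.empty, PySem.Set.empty) :
      PySem.Dict String (Int × String) × PySem.Set String)
    ⟨rfl, rfl, rfl, rfl, rfl, List.nodup_nil⟩ hknd
    (fun k _ => PySem.Dict.contains_empty k)
  obtain ⟨h1, h2, h3, h4, h5, h6⟩ := houter
  -- B's inverted pred dict equals A's rmap
  have hpred : ((PySem.Dict.mk seqs).keys.foldl (fun st p1 =>
        match pvFirstB (PySem.Dict.mk seqs) p1 st.2 (PySem.Dict.mk seqs).keys with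
        | some c => (st.1.insert p1 c, PySem.Set.add st.2 c.2)
        | none => st)
      ((PySem.Dict.empty, PySem.Set.empty) :
        PySem.Dict String (Int × String) × PySem.Set String)).1.items.foldl
      (fun pr p => pr.insert p.2.2 p.1) (PySem.Dict.empty : PySem.Dict String String)
      = ((PySem.Dict.mk seqs).keys.foldl (fun st p1 =>
          pvInnerA (PySem.Dict.mk seqs) p1 st (PySem.Dict.mk seqs).keys)
        ((PySem.Dict.empty, PySem.Dict.empty, PySem.Dict.empty, PySem.Dict.empty) : pvStA)).2.1 := by
    apply PySem.Dict.ext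
    rw [PySem.Dict.items_foldl_insert_fresh _ (fun (p : String × (Int × String)) => p.2.2)
      (fun (p : String × (Int × String)) => p.1) _
      (fun a _ => PySem.Dict.contains_empty _) (h5 ▸ h6)]
    rw [h2]
    simp
    rfl
  rw [h1, hpred, pv_chase_eq, pv_forward_eq]



-- ===== VERDICT (by name: the statement is the Claim_ definition above) =====
theorem construct_assembly_spec : Claim_equal_construct_assembly := by
  intro seqs _ hpre
  unfold Spec_construct_assembly
  exact pv_main seqs hpre.2.1
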